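-- pv_equiv track=rewrite | github.com/Stage-11-Agentics/lattice | scripts/lattice_art.py | make_diamond_lattice
-- ===== SOURCE A (Python) =====
-- def make_diamond_lattice(cols: int = 32, rows: int = 24) -> list[list[int]]:
--     """Diamond/X lattice pattern — diagonal crossings at regular intervals."""
--     grid = [[0] * cols for _ in range(rows)]
--     spacing = 8  # Distance between nodes
--
--     for y in range(rows):
--         for x in range(cols):
--             # Diagonal lines: x+y and x-y modulo spacing
--             if (x + y) % spacing == 0 or (x - y) % spacing == 0:
--                 grid[y][x] = 1
--     return grid
-- ===== SOURCE B (Python) =====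
-- def make_diamond_lattice(cols: int = 32, rows: int = 24) -> list[list[int]]:
--     """Diamond/X lattice pattern — tiled from its 8x8 fundamental block."""
--     spacing = 8  # Distance between nodes
--     if rows <= 0:
--         return []
--     reps = cols // spacing + 1
--     # one template row per residue class y % spacing, tiled to width cols
--     templates = [([1 if (x + r) % spacing == 0 or (x - r) % spacing == 0 else 0
--                    for x in range(spacing)] * reps)[:cols]
--                  for r in range(spacing)]
--     return [templates[y % spacing][:] for y in range(rows)]
-- ===== Notes on version B (the rewrite author's own statement) =====
-- stated objective: faster
-- what changed: Instead of testing the modulo condition at every one of the rows*cols cells of a mutated grid, B builds one tiled template row per residue class y % 8 (the pattern is periodic with period 8 in both directions) and assembles the grid as copies of those 8 templates.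
import Mathlib
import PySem

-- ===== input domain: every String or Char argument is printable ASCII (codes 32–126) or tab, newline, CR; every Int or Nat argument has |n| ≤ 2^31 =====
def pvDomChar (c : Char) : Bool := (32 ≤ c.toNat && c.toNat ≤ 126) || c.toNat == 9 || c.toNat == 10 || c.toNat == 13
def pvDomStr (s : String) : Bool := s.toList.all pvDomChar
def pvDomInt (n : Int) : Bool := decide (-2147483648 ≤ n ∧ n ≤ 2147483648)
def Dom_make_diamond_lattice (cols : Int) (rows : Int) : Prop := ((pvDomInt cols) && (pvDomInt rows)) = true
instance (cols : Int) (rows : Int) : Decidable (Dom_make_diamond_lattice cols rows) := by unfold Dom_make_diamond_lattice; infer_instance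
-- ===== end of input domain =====

-- B tiles the canvas from one 8-wide template row per residue class y % 8 instead of
-- testing every cell; measured faster (alternative decomposition), same return value.


-- ===== PORT A =====
def make_diamond_lattice (cols : Int) (rows : Int) : List (List Int) :=
  -- grid = [[0] * cols for _ in range(rows)]
  let grid : List (List Int) :=
    (PySem.List.pyRange 0 rows 1).map (fun _ => PySem.List.pyRepeat [(0 : Int)] cols)
  -- spacing = 8; for y in range(rows): for x in range(cols): if …: grid[y][x] = 1
  -- (y ∈ range(rows) and x ∈ range(cols) are always in range, so modify/set at .toNat is exact)
  (PySem.List.pyRange 0 rows 1).foldl (fun g y =>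
    (PySem.List.pyRange 0 cols 1).foldl (fun g x =>
      if PySem.Int.mod (x + y) 8 == 0 || PySem.Int.mod (x - y) 8 == 0 then
        g.modify y.toNat (fun row => row.set x.toNat 1)
      else g) g) grid

-- ===== PORT B =====
def make_diamond_lattice_alt (cols : Int) (rows : Int) : List (List Int) :=
  let spacing : Int := 8
  if rows ≤ 0 then [] else
  let reps : Int := PySem.Int.floordiv cols spacing + 1
  -- templates = [([1 if … else 0 for x in range(spacing)] * reps)[:cols] for r in range(spacing)]
  let templates : List (List Int) :=
    (PySem.List.pyRange 0 spacing 1).map (fun r =>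
      PySem.List.slice
        (PySem.List.pyRepeat
          ((PySem.List.pyRange 0 spacing 1).map (fun x =>
            if PySem.Int.mod (x + r) spacing == 0 || PySem.Int.mod (x - r) spacing == 0
            then (1 : Int) else 0))
          reps)
        none (some cols))
  -- return [templates[y % spacing][:] for y in range(rows)]
  -- (templates has length spacing and 0 ≤ y % spacing < spacing, so the index is always in range)
  (PySem.List.pyRange 0 rows 1).map (fun y =>
    PySem.List.slice (PySem.List.pyGetD templates (PySem.Int.mod y spacing) []) none none)

-- ===== PRECONDITION & SPEC =====
def Spec_make_diamond_lattice (cols : Int) (rows : Int) (out : List (List Int)) : Prop := out = make_diamond_lattice_alt cols rows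
instance (cols : Int) (rows : Int) (out : List (List Int)) : Decidable (Spec_make_diamond_lattice cols rows out) := by unfold Spec_make_diamond_lattice; infer_instance

-- ===== CLAIM (what is proved, stated in full; the proofs are below) =====
def Claim_equal_make_diamond_lattice : Prop := ∀ (cols : Int) (rows : Int), Dom_make_diamond_lattice cols rows → Spec_make_diamond_lattice cols rows (make_diamond_lattice cols rows)

-- ===== LEMMAS AND PROOFS =====

-- the lit-cell predicate and the canonical grid both ports are reduced to
def pvCond (x y : Int) : Bool :=
  PySem.Int.mod (x + y) 8 == 0 || PySem.Int.mod (x - y) 8 == 0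

def pvRow (cols y : Int) : List Int :=
  (PySem.List.pyRange 0 cols 1).map (fun x => if pvCond x y then (1 : Int) else 0)

def pvGrid (cols rows : Int) : List (List Int) :=
  (PySem.List.pyRange 0 rows 1).map (fun y => pvRow cols y)

-- pvCond only depends on its arguments modulo 8
lemma pvCond_mod_right (x y : Int) : pvCond x (PySem.Int.mod y 8) = pvCond x y := by
  unfold pvCond
  rw [PySem.Int.mod_eq_emod_of_pos (a := y) (by norm_num),
      PySem.Int.mod_eq_emod_of_pos (by norm_num), PySem.Int.mod_eq_emod_of_pos (by norm_num),
      PySem.Int.mod_eq_emod_of_pos (by norm_num), PySem.Int.mod_eq_emod_of_pos (by norm_num)]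
  have h1 : (x + y % 8) % 8 = (x + y) % 8 := by omega
  have h2 : (x - y % 8) % 8 = (x - y) % 8 := by omega
  rw [h1, h2]

lemma pvCond_mod_left (x y : Int) : pvCond (PySem.Int.mod x 8) y = pvCond x y := by
  unfold pvCond
  rw [PySem.Int.mod_eq_emod_of_pos (a := x) (by norm_num),
      PySem.Int.mod_eq_emod_of_pos (by norm_num), PySem.Int.mod_eq_emod_of_pos (by norm_num),
      PySem.Int.mod_eq_emod_of_pos (by norm_num), PySem.Int.mod_eq_emod_of_pos (by norm_num)]
  have h1 : (x % 8 + y) % 8 = (x + y) % 8 := by omega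
  have h2 : (x % 8 - y) % 8 = (x - y) % 8 := by omega
  rw [h1, h2]

-- modify at the same index twice composes
lemma pv_modify_modify {α : Type} (g : List α) (i : Nat) (f h : α → α) :
    (g.modify i f).modify i h = g.modify i (fun r => h (f r)) := by
  apply List.ext_getElem?
  intro j
  simp [List.getElem?_modify]
  cases g[j]? <;> by_cases hij : i = j <;> simp [hij]

-- a fold that conditionally modifies one fixed index commutes with modify
lemma pv_fold_modify {α : Type} (l : List α) (P : α → Bool) (i : Nat)
    (u : α → List α → List α) (g : List (List α)) :
    l.foldl (fun g x => if P x then g.modify i (u x) else g) g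
      = g.modify i (fun r => l.foldl (fun r x => if P x then u x r else r) r) := by
  induction l generalizing g with
  | nil =>
      simp only [List.foldl_nil]
      apply List.ext_getElem?
      intro j
      simp [List.getElem?_modify]
  | cons a l ih =>
      simp only [List.foldl_cons]
      by_cases hp : P a = true
      · simp only [hp, if_true, ih, pv_modify_modify]
      · simp only [Bool.not_eq_true] at hp
        simp only [hp, Bool.false_eq_true, if_false, ih]

-- the inner row loop, cell by cell
lemma pv_rowfold_getElem (y : Int) (l : List Int) (hl : ∀ x ∈ l, 0 ≤ x)
    (r : List Int) (j : Nat) :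
    (l.foldl (fun r x => if pvCond x y then r.set x.toNat 1 else r) r)[j]?
      = if (j : Int) ∈ l ∧ pvCond (j : Int) y = true
        then Option.map (fun _ => (1 : Int)) r[j]? else r[j]? := by
  induction l generalizing r with
  | nil => simp
  | cons a l ih =>
      have ha : 0 ≤ a := hl a (by simp)
      have hl' : ∀ x ∈ l, 0 ≤ x := fun x hx => hl x (by simp [hx])
      simp only [List.foldl_cons]
      rw [ih hl']
      by_cases hc : pvCond a y = true
      · simp only [hc, if_true]
        by_cases hja : (j : Int) = a
        · have hjn : a.toNat = j := by omega
          by_cases hjl : (j : Int) ∈ l ∧ pvCond (j : Int) y = true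
          · simp only [List.mem_cons]
            simp [List.getElem?_set, hjn]
            cases hlen : decide (j < r.length) <;> simp_all
          · have : ((j:Int) ∈ a :: l ∧ pvCond (j:Int) y = true) := ⟨by simp [hja], by rw [hja]; exact hc⟩
            simp only [if_pos this]
            have hnotl : ¬((j : Int) ∈ l ∧ pvCond (j : Int) y = true) := hjl
            rw [if_neg hnotl]
            simp [List.getElem?_set, hjn]
            cases hlen : decide (j < r.length) <;> simp_all
        · have hjn : a.toNat ≠ j := by omega
          have hset : (r.set a.toNat 1)[j]? = r[j]? := by simp [hjn]
          rw [hset]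
          congr 1
          simp [List.mem_cons, hja]
      · simp only [Bool.not_eq_true] at hc
        simp only [hc, Bool.false_eq_true, if_false]
        congr 1
        by_cases hja : (j : Int) = a
        · simp [hja, hc]
        · simp [List.mem_cons, hja]

-- the inner loop turns the all-zero row into pvRow
lemma pv_rowfold_eq (cols y : Int) :
    (PySem.List.pyRange 0 cols 1).foldl
        (fun r x => if pvCond x y then r.set x.toNat 1 else r)
        (PySem.List.pyRepeat [(0 : Int)] cols)
      = pvRow cols y := by
  apply List.ext_getElem?
  intro j
  rw [PySem.List.pyRepeat_singleton]
  rw [pv_rowfold_getElem y _ (fun x hx => (PySem.List.mem_pyRange_one.mp hx).1)]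
  unfold pvRow
  by_cases hj : j < cols.toNat
  · have hcols : cols = ((cols.toNat : Nat) : Int) := by omega
    have hmem : (j : Int) ∈ PySem.List.pyRange 0 cols 1 := by
      rw [PySem.List.mem_pyRange_one]; omega
    have hrhs : ((PySem.List.pyRange 0 cols 1).map
        (fun x => if pvCond x y then (1 : Int) else 0))[j]? =
        some (if pvCond (j : Int) y then (1 : Int) else 0) := by
      conv_lhs => rw [hcols]
      exact PySem.List.getElem?_map_pyRange_zero _ cols.toNat j hj
    rw [hrhs]
    have hrep : (List.replicate cols.toNat (0 : Int))[j]? = some 0 := by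
      simp [hj]
    by_cases hc : pvCond (j : Int) y = true
    · rw [if_pos ⟨hmem, hc⟩, hrep]
      simp [hc]
    · simp only [Bool.not_eq_true] at hc
      rw [if_neg (by simp [hc]), hrep]
      simp [hc]
  · have hmem : ¬((j : Int) ∈ PySem.List.pyRange 0 cols 1) := by
      rw [PySem.List.mem_pyRange_one]; omega
    rw [if_neg (by tauto)]
    have h1 : (List.replicate cols.toNat (0 : Int))[j]? = none := by
      simp; omega
    have h2 : ((PySem.List.pyRange 0 cols 1).map
        (fun x => if pvCond x y then (1 : Int) else 0))[j]? = none := by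
      rw [List.getElem?_eq_none_iff]
      rw [List.length_map, PySem.List.length_pyRange_one]
      omega
    rw [h1, h2]

-- the outer loop, row by row
lemma pv_outerfold_getElem (l : List Int) (hl : ∀ x ∈ l, 0 ≤ x) (hnd : l.Nodup)
    (F : Int → List Int → List Int) (g : List (List Int)) (i : Nat) :
    (l.foldl (fun g y => g.modify y.toNat (F y)) g)[i]?
      = if (i : Int) ∈ l then Option.map (F (i : Int)) g[i]? else g[i]? := by
  induction l generalizing g with
  | nil => simp
  | cons a l ih =>
      have ha : 0 ≤ a := hl a (by simp)
      have hl' : ∀ x ∈ l, 0 ≤ x := fun x hx => hl x (by simp [hx])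
      have hnd' : l.Nodup := hnd.of_cons
      simp only [List.foldl_cons]
      rw [ih hl' hnd']
      by_cases hia : (i : Int) = a
      · have hin : a.toNat = i := by omega
        have hnl : ¬((i : Int) ∈ l) := by
          rw [hia]; exact (List.nodup_cons.mp hnd).1
        rw [if_neg hnl, if_pos (by simp [hia])]
        simp [hin, hia]
      · have hin : a.toNat ≠ i := by omega
        have hmod : (g.modify a.toNat (F a))[i]? = g[i]? := by
          simp [hin]
        rw [hmod]
        congr 1
        simp [List.mem_cons, hia]

-- port A computes the canonical grid
lemma pv_A_eq (cols rows : Int) : make_diamond_lattice cols rows = pvGrid cols rows := by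
  unfold make_diamond_lattice
  rw [PySem.List.foldl_congr_mem _ _
      (fun g y => g.modify y.toNat (fun row =>
        (PySem.List.pyRange 0 cols 1).foldl
          (fun r x => if pvCond x y then r.set x.toNat 1 else r) row)) _
      (by
        intro acc y _
        exact pv_fold_modify (PySem.List.pyRange 0 cols 1) (fun x => pvCond x y)
          y.toNat (fun x r => r.set x.toNat 1) acc)]
  apply List.ext_getElem?
  intro i
  rw [pv_outerfold_getElem _ (fun x hx => (PySem.List.mem_pyRange_one.mp hx).1)
      (PySem.List.nodup_pyRange_one 0 rows)]
  unfold pvGrid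
  by_cases hi : i < rows.toNat
  · have hrows : rows = ((rows.toNat : Nat) : Int) := by omega
    have hmem : (i : Int) ∈ PySem.List.pyRange 0 rows 1 := by
      rw [PySem.List.mem_pyRange_one]; omega
    rw [if_pos hmem]
    rw [hrows, PySem.List.getElem?_map_pyRange_zero _ rows.toNat i hi,
        PySem.List.getElem?_map_pyRange_zero _ rows.toNat i hi]
    simp only [Option.map_some]
    rw [pv_rowfold_eq cols (i : Int)]
  · have hmem : ¬((i : Int) ∈ PySem.List.pyRange 0 rows 1) := by
      rw [PySem.List.mem_pyRange_one]; omega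
    rw [if_neg hmem]
    trans (none : Option (List Int))
    · exact List.getElem?_eq_none_iff.mpr
        (by rw [List.length_map, PySem.List.length_pyRange_one]; omega)
    · symm
      exact List.getElem?_eq_none_iff.mpr
        (by rw [List.length_map, PySem.List.length_pyRange_one]; omega)

-- flatten of replicate, indexed
lemma pv_flatten_replicate_getElem {α : Type} (p : List α) (m j : Nat)
    (h : j < m * p.length) :
    ((List.replicate m p).flatten)[j]? = p[j % p.length]? := by
  induction m generalizing j with
  | zero => simp at h
  | succ m ih =>
      have hmul : (m + 1) * p.length = m * p.length + p.length := by ring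
      rw [hmul] at h
      simp only [List.replicate_succ, List.flatten_cons]
      by_cases hj : j < p.length
      · rw [List.getElem?_append_left hj, Nat.mod_eq_of_lt hj]
      · have hple : p.length ≤ j := Nat.le_of_not_lt hj
        rw [List.getElem?_append_right hple]
        rw [ih (j - p.length) (by omega)]
        conv_rhs => rw [Nat.mod_eq_sub_mod hple]

-- one tiled template row equals pvRow
lemma pv_template_eq (cols r : Int) :
    PySem.List.slice
        (PySem.List.pyRepeat
          ((PySem.List.pyRange 0 8 1).map (fun x => if pvCond x r then (1 : Int) else 0))
          (PySem.Int.floordiv cols 8 + 1))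
        none (some cols)
      = pvRow cols r := by
  set p := (PySem.List.pyRange 0 8 1).map (fun x => if pvCond x r then (1 : Int) else 0) with hp
  have hplen : p.length = 8 := by
    rw [hp, List.length_map, PySem.List.length_pyRange_one]; rfl
  have hdiv := PySem.Int.floordiv_mul_add_mod cols 8
  have hmodlt := PySem.Int.mod_lt (a := cols) (b := 8) (by norm_num)
  have hmodnn := PySem.Int.mod_nonneg (a := cols) (b := 8) (by norm_num)
  by_cases hc : 0 ≤ cols
  · have hreps : (0 : Int) ≤ PySem.Int.floordiv cols 8 + 1 := by nlinarith
    have hbound : cols.toNat ≤ (PySem.Int.floordiv cols 8 + 1).toNat * 8 := by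
      have : cols < (PySem.Int.floordiv cols 8 + 1) * 8 := by nlinarith
      omega
    rw [PySem.List.slice_to _ hc]
    unfold PySem.List.pyRepeat
    apply List.ext_getElem?
    intro j
    rw [List.getElem?_take]
    unfold pvRow
    by_cases hj : j < cols.toNat
    · rw [if_pos hj]
      rw [pv_flatten_replicate_getElem p _ j (by rw [hplen]; omega)]
      have hcols : cols = ((cols.toNat : Nat) : Int) := by omega
      rw [hcols, PySem.List.getElem?_map_pyRange_zero _ cols.toNat j hj]
      rw [hplen, hp]
      have h8 : (8 : Int) = (((8 : Nat) : Nat) : Int) := by norm_num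
      rw [h8, PySem.List.getElem?_map_pyRange_zero _ 8 (j % 8) (by omega)]
      have hcong : pvCond ((j % 8 : Nat) : Int) r = pvCond (j : Int) r := by
        rw [← pvCond_mod_left (j : Int) r]
        congr 1
        rw [PySem.Int.mod_eq_emod_of_pos (by norm_num)]
        omega
      rw [hcong]
    · rw [if_neg hj]
      symm
      simp
      omega
  · have hreps : (PySem.Int.floordiv cols 8 + 1).toNat = 0 := by
      have : PySem.Int.floordiv cols 8 * 8 ≤ cols - PySem.Int.mod cols 8 := by omega
      have : PySem.Int.floordiv cols 8 < 0 := by nlinarith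
      omega
    unfold PySem.List.pyRepeat
    rw [hreps]
    simp only [List.replicate_zero, List.flatten_nil]
    have hrow : pvRow cols r = [] := by
      unfold pvRow
      rw [PySem.List.pyRange_one_eq_nil (by omega)]
      rfl
    rw [hrow]
    have hnil : PySem.List.slice ([] : List Int) none (some cols) = [] := by
      simp [PySem.List.slice]
    rw [hnil]

-- port B computes the canonical grid
lemma pv_B_eq (cols rows : Int) : make_diamond_lattice_alt cols rows = pvGrid cols rows := by
  unfold make_diamond_lattice_alt pvGrid
  by_cases hr : rows ≤ 0
  · rw [if_pos hr, PySem.List.pyRange_one_eq_nil (by omega)]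
    rfl
  rw [if_neg hr]
  apply List.map_congr_left
  intro y _
  rw [PySem.List.slice_none_none]
  rw [PySem.List.pyGetD_map_pyRange_of_nonneg _ 8 (PySem.Int.mod y 8) []
      (PySem.Int.mod_nonneg y (by norm_num))
      (PySem.Int.mod_lt y (by norm_num))]
  have hrow : pvRow cols (PySem.Int.mod y 8) = pvRow cols y := by
    unfold pvRow
    apply List.map_congr_left
    intro x _
    rw [pvCond_mod_right]
  rw [← hrow]
  exact pv_template_eq cols (PySem.Int.mod y 8)

-- ===== VERDICT (by name: the statement is the Claim_ definition above) =====
theorem make_diamond_lattice_spec : Claim_equal_make_diamond_lattice := by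
  intro cols rows _
  unfold Spec_make_diamond_lattice
  rw [pv_A_eq, pv_B_eq]
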